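-- pv_equiv track=rewrite | github.com/Kdelphinus/Python_study | 월간 코드 챌린지/Level 2/2개 이하로 다른 비트.py | solution
-- ===== SOURCE A (Python) =====
-- def solution(numbers):
--     answer = []
--     for number in numbers:
--         cnt = 0
--         if number % 2:
--             bin_num = bin(number)
--             for i in range(len(bin_num) - 1, -1, -1):
--                 if bin_num[i] != "1":
--                     break
--                 cnt += 1
--             answer.append(number + 2 ** (cnt - 1))
--         else:
--             answer.append(number + 1)
--     return answer
-- ===== SOURCE B (Python) =====
-- def solution(numbers):
--     # For each n: ((a+1) & ~a) is the lowest zero bit of a = abs(n), i.e.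
--     # 2**(number of trailing one bits of a).  For odd n the answer is
--     # n + 2**(trailing_ones - 1) = n + (low >> 1); for even n low == 1,
--     # low >> 1 == 0, and max(..., 1) yields the n + 1 case.  Branchless,
--     # no binary-string construction or scanning.
--     def step(n):
--         a = abs(n)
--         return n + max(((a + 1) & ~a) >> 1, 1)
--     return [step(n) for n in numbers]
-- ===== Notes on version B (the rewrite author's own statement) =====
-- stated objective: simpler
-- what changed: Replaces building bin(n) and scanning its characters backwards (plus an even/odd branch) with one branchless arithmetic formula per element: n + max((((a+1) & ~a) >> 1), 1) with a = abs(n), where (a+1) & ~a is 2**(trailing ones of a).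
import Mathlib
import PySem

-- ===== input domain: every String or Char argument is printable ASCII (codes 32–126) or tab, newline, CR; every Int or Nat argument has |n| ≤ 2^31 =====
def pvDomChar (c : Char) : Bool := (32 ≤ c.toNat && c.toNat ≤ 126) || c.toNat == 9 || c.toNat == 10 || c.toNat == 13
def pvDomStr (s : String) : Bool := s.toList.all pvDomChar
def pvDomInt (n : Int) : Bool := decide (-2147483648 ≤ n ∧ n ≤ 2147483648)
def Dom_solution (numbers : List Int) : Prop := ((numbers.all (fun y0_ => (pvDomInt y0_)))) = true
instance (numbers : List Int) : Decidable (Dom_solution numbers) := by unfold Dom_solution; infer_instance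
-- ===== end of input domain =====

-- B replaces A's bin()-string construction and backward character scan (plus the even/odd
-- branch) by one branchless arithmetic formula per element; return values are identical.

-- ===== PORT A =====
-- A's inner loop 'for i in range(len(bin_num)-1, -1, -1): if bin_num[i] != "1": break; cnt += 1'
-- walks the indices len-1 .. 0 and stops at the first character ≠ '1'; ported exactly as
-- recursion over the reversed character list.
def pvScan : List Char → Nat
  | [] => 0
  | c :: cs => if c = '1' then pvScan cs + 1 else 0

def solution (numbers : List Int) : List Int :=
  numbers.foldl
    (fun answer number =>
      if PySem.Int.mod number 2 ≠ 0 then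
        -- bin(number) → PySem.Int.pyBin; cnt ≥ 1 whenever this branch is taken (the binary
        -- string of an odd number ends in '1'), so Nat subtraction in 2 ^ (cnt - 1) is
        -- Python's 2 ** (cnt - 1) exactly.
        let bin_num := PySem.Int.pyBin number
        let cnt := pvScan bin_num.toList.reverse
        answer ++ [number + (2 : Int) ^ (cnt - 1)]
      else
        answer ++ [number + 1])
    []

-- ===== PORT B =====
-- Python '&' → PySem.Int.band, '~a' → Int.not, '>> 1' → '>>> (1 : Nat)' (all Python-exact).
def solution_alt (numbers : List Int) : List Int :=
  numbers.map (fun n =>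
    let a : Int := |n|
    n + max ((PySem.Int.band (a + 1) (Int.not a)) >>> (1 : Nat)) 1)

-- ===== PRECONDITION & SPEC =====
def Spec_solution (numbers : List Int) (out : List Int) : Prop := out = solution_alt numbers
instance (numbers : List Int) (out : List Int) : Decidable (Spec_solution numbers out) := by unfold Spec_solution; infer_instance

-- ===== CLAIM (what is proved, stated in full; the proofs are below) =====
def Claim_equal_solution : Prop := ∀ (numbers : List Int), Dom_solution numbers → Spec_solution numbers (solution numbers)

-- ===== LEMMAS AND PROOFS =====

-- number of trailing one bits of a natural number
def pvF : Nat → Nat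
  | 0 => 0
  | m + 1 => if (m + 1) % 2 = 1 then pvF ((m + 1) / 2) + 1 else 0
decreasing_by omega

-- the binary digits of m (no prefix), most significant first
def pvBinDigits : Nat → List Char
  | 0 => []
  | m + 1 => pvBinDigits ((m + 1) / 2) ++ [if (m + 1) % 2 = 1 then '1' else '0']
decreasing_by omega

lemma pvF_eq (k : Nat) : pvF (k + 1) = if (k + 1) % 2 = 1 then pvF ((k + 1) / 2) + 1 else 0 := by
  rw [pvF]

lemma pvBinDigits_eq (k : Nat) :
    pvBinDigits (k + 1) = pvBinDigits ((k + 1) / 2) ++ [if (k + 1) % 2 = 1 then '1' else '0'] := by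
  rw [pvBinDigits]

lemma two_pow_pvF_le (m : Nat) : 2 ^ pvF m ≤ m + 1 := by
  induction m using Nat.strong_induction_on with
  | _ m ih =>
    rcases m with _ | k
    · simp [pvF]
    · rw [pvF_eq]
      split_ifs with h
      · have := ih ((k + 1) / 2) (by omega)
        rw [pow_succ]
        omega
      · simp

lemma pvScan_digits (m : Nat) (hm : 0 < m) (tail : List Char) (ht : pvScan tail = 0) :
    pvScan ((pvBinDigits m).reverse ++ tail) = pvF m := by
  induction m using Nat.strong_induction_on with
  | _ m ih =>
    rcases m with _ | k
    · omega
    · rw [pvBinDigits_eq, pvF_eq]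
      rcases Nat.mod_two_eq_zero_or_one (k + 1) with h | h
      · simp [h, pvScan]
      · simp only [h, List.reverse_append, List.reverse_cons, List.reverse_nil,
          List.nil_append, List.cons_append, pvScan]
        rcases Nat.eq_zero_or_pos ((k + 1) / 2) with h0 | h0
        · rw [h0]
          simp [pvBinDigits, pvF, ht]
        · rw [ih ((k + 1) / 2) (by omega) h0]
          simp

lemma toDigitsCore_eq (fuel : Nat) : ∀ (m : Nat) (ds : List Char), 0 < m → m < fuel →
    Nat.toDigitsCore 2 fuel m ds = pvBinDigits m ++ ds := by
  induction fuel with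
  | zero => intro m ds h1 h2; omega
  | succ f ih =>
    intro m ds h1 h2
    rw [Nat.toDigitsCore]
    rcases m with _ | k
    · omega
    · rw [pvBinDigits_eq]
      by_cases h0 : (k + 1) / 2 = 0
      · have hk : k = 0 := by omega
        subst hk
        simp [h0, pvBinDigits, Nat.digitChar]
      · rw [if_neg h0, ih ((k + 1) / 2) _ (by omega) (by omega)]
        rcases Nat.mod_two_eq_zero_or_one (k + 1) with h | h <;>
          simp [h, Nat.digitChar]

lemma toDigits_eq (m : Nat) (hm : 0 < m) : Nat.toDigits 2 m = pvBinDigits m := by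
  have := toDigitsCore_eq (m + 1) m [] hm (by omega)
  simpa [Nat.toDigits] using this

lemma land_succ (m : Nat) : (m + 1) &&& m = (m + 1) - 2 ^ pvF m := by
  induction m using Nat.strong_induction_on with
  | _ m ih =>
    rcases m with _ | k
    · simp [pvF]
    · set m := k + 1 with hmdef
      rcases Nat.mod_two_eq_zero_or_one m with h | h
      · -- m even: m+1 = bit true (m/2), m = bit false (m/2)
        have h1 : m + 1 = Nat.bit true (m / 2) := by simp [Nat.bit]; omega
        have h2 : m = Nat.bit false (m / 2) := by simp [Nat.bit]; omega
        calc (m + 1) &&& m = Nat.bit true (m / 2) &&& Nat.bit false (m / 2) := by rw [← h1, ← h2]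
          _ = Nat.bit (true && false) (m / 2 &&& m / 2) := by
                rw [Nat.land_bit]
          _ = m := by simp [Nat.bit]; omega
          _ = (m + 1) - 2 ^ pvF m := by rw [hmdef, pvF_eq, ← hmdef, if_neg (by omega)]; simp
      · -- m odd: m+1 = bit false y, m = bit true (y-1) with y = (m+1)/2 = m/2 + 1
        have hy : (m + 1) / 2 = m / 2 + 1 := by omega
        have h1 : m + 1 = Nat.bit false (m / 2 + 1) := by simp [Nat.bit]; omega
        have h2 : m = Nat.bit true (m / 2) := by simp [Nat.bit]; omega
        have hle := two_pow_pvF_le (m / 2)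
        have hf : pvF m = pvF (m / 2) + 1 := by
          rw [hmdef, pvF_eq, ← hmdef, if_pos h]
        calc (m + 1) &&& m = Nat.bit false (m / 2 + 1) &&& Nat.bit true (m / 2) := by
                rw [← h1, ← h2]
          _ = Nat.bit (false && true) ((m / 2 + 1) &&& (m / 2)) := by rw [Nat.land_bit]
          _ = 2 * ((m / 2 + 1) &&& (m / 2)) := by simp [Nat.bit]
          _ = 2 * ((m / 2 + 1) - 2 ^ pvF (m / 2)) := by rw [ih (m / 2) (by omega)]
          _ = (m + 1) - 2 ^ pvF m := by rw [hf, pow_succ]; omega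

lemma band_not (m : Nat) :
    PySem.Int.band ((m : Int) + 1) (Int.not (m : Int)) = ((2 ^ pvF m : Nat) : Int) := by
  have hnot : Int.not (m : Int) = Int.negSucc m := rfl
  rw [hnot]
  have h1 : (0 : Int) ≤ (m : Int) + 1 := by positivity
  have h2 : ¬ (0 : Int) ≤ Int.negSucc m := by
    rw [Int.negSucc_eq]; omega
  rw [PySem.Int.band, if_pos h1, if_neg h2]
  have h3 : (-(Int.negSucc m) - 1).toNat = m := by
    rw [Int.negSucc_eq]; omega
  have h4 : ((m : Int) + 1).toNat = m + 1 := by omega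
  rw [h3, h4, land_succ]
  have hle := two_pow_pvF_le m
  rw [Nat.sub_sub_self hle]

-- per-element value of A's loop body
def pvGA (n : Int) : Int :=
  if PySem.Int.mod n 2 ≠ 0 then
    n + (2 : Int) ^ (pvScan (PySem.Int.pyBin n).toList.reverse - 1)
  else n + 1

lemma solution_foldl (xs : List Int) (acc : List Int) :
    xs.foldl
      (fun answer number =>
        if PySem.Int.mod number 2 ≠ 0 then
          let bin_num := PySem.Int.pyBin number
          let cnt := pvScan bin_num.toList.reverse
          answer ++ [number + (2 : Int) ^ (cnt - 1)]
        else
          answer ++ [number + 1]) acc = acc ++ xs.map pvGA := by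
  induction xs generalizing acc with
  | nil => simp
  | cons x xs ih =>
    simp only [List.foldl_cons, List.map_cons]
    rw [ih]
    simp only [pvGA]
    split_ifs <;> simp

lemma parity_mod (n : Int) : PySem.Int.mod n 2 = 0 ↔ n.natAbs % 2 = 0 := by
  have h : PySem.Int.mod n 2 = n % 2 := by simp [pysem]
  rw [h]
  omega

lemma pvScan_bin (n : Int) (hodd : n.natAbs % 2 = 1) :
    pvScan (PySem.Int.pyBin n).toList.reverse = pvF n.natAbs := by
  have hpos : 0 < n.natAbs := by omega
  rw [PySem.Int.toList_pyBin, PySem.Int.toBinChars0b]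
  by_cases hneg : n < 0
  · rw [if_pos hneg, toDigits_eq n.natAbs hpos]
    have : ('-' :: '0' :: 'b' :: pvBinDigits n.natAbs).reverse
        = (pvBinDigits n.natAbs).reverse ++ ['b', '0', '-'] := by simp
    rw [this, pvScan_digits n.natAbs hpos _ (by simp [pvScan])]
  · rw [if_neg hneg]
    have htn : n.toNat = n.natAbs := by omega
    rw [htn, toDigits_eq n.natAbs hpos]
    have : ('0' :: 'b' :: pvBinDigits n.natAbs).reverse
        = (pvBinDigits n.natAbs).reverse ++ ['b', '0'] := by simp
    rw [this, pvScan_digits n.natAbs hpos _ (by simp [pvScan])]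

lemma shiftRight_natCast (k j : Nat) : ((k : Int) >>> j) = ((k >>> j : Nat) : Int) := by
  simp [HShiftRight.hShiftRight, Int.shiftRight]

lemma elem_eq (n : Int) :
    pvGA n = n + max ((PySem.Int.band (|n| + 1) (Int.not |n|)) >>> (1 : Nat)) 1 := by
  rw [pvGA, Int.abs_eq_natAbs, band_not, shiftRight_natCast]
  rcases Nat.mod_two_eq_zero_or_one n.natAbs with h | h
  · rw [if_neg (by simp only [ne_eq, not_not]; exact (parity_mod n).mpr h)]
    have hf : pvF n.natAbs = 0 := by
      rcases Nat.eq_zero_or_pos n.natAbs with h0 | h0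
      · rw [h0]; simp [pvF]
      · obtain ⟨k, hk⟩ : ∃ k, n.natAbs = k + 1 := ⟨n.natAbs - 1, by omega⟩
        rw [hk] at h ⊢
        rw [pvF_eq, if_neg (by omega)]
    rw [hf]
    norm_num
  · have hmod : PySem.Int.mod n 2 ≠ 0 := fun hc => by
      have := (parity_mod n).mp hc; omega
    rw [if_pos hmod, pvScan_bin n h]
    have hf1 : 1 ≤ pvF n.natAbs := by
      obtain ⟨k, hk⟩ : ∃ k, n.natAbs = k + 1 := ⟨n.natAbs - 1, by omega⟩
      rw [hk, pvF_eq, if_pos (by omega)]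
      omega
    have hsh : (2 ^ pvF n.natAbs) >>> 1 = 2 ^ (pvF n.natAbs - 1) := by
      rw [Nat.shiftRight_eq_div_pow, Nat.pow_div hf1 (by norm_num)]
    rw [hsh]
    have hmax : max ((2 ^ (pvF n.natAbs - 1) : Nat) : Int) 1 = ((2 ^ (pvF n.natAbs - 1) : Nat) : Int) := by
      have : (1 : Int) ≤ ((2 ^ (pvF n.natAbs - 1) : Nat) : Int) := by
        exact_mod_cast Nat.one_le_two_pow
      omega
    rw [hmax]
    push_cast
    ring

-- ===== VERDICT (by name: the statement is the Claim_ definition above) =====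
theorem solution_spec : Claim_equal_solution := by
  intro numbers _
  show solution numbers = solution_alt numbers
  rw [solution, solution_alt, solution_foldl]
  simp only [List.nil_append]
  apply List.map_congr_left
  intro n _
  exact elem_eq n
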